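-- pv_equiv track=rewrite | github.com/aliattar31/med-anomaly-dashboard | MED Data v2/med_pipeline.py | map_vintage_cohort
-- ===== SOURCE A (Python) =====
-- def map_vintage_cohort(v):
--     if v is None:
--         return 'Unknown'
--     v = str(v)
--     if 'pre2013' in v or '2013' in v or '2014' in v or '2015' in v:
--         return 'Legacy (pre-2016)'
--     if any(y in v for y in ['2016', '2017', '2018', '2019']):
--         return 'Growth Era (2016-2019)'
--     if any(y in v for y in ['2020', '2021', '2022']):
--         return 'Post-COVID (2020-2022)'
--     if any(y in v for y in ['2023', '2024', '2025']):
--         return 'Recent (2023+)'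
--     return 'Acquisition'
-- ===== SOURCE B (Python) =====
-- _COHORT_RANK = {
--     '2013': 0, '2014': 0, '2015': 0,
--     '2016': 1, '2017': 1, '2018': 1, '2019': 1,
--     '2020': 2, '2021': 2, '2022': 2,
--     '2023': 3, '2024': 3, '2025': 3,
-- }
-- # 'pre2013' needs no entry: it contains '2013' as a substring.
-- _COHORT_LABELS = ['Legacy (pre-2016)', 'Growth Era (2016-2019)',
--                   'Post-COVID (2020-2022)', 'Recent (2023+)']
--
-- def map_vintage_cohort(v):
--     if v is None:
--         return 'Unknown'
--     v = str(v)
--     best = 4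
--     for tok, rank in _COHORT_RANK.items():
--         if tok in v and rank < best:
--             best = rank
--     return 'Acquisition' if best == 4 else _COHORT_LABELS[best]
-- ===== Notes on version B (the rewrite author's own statement) =====
-- stated objective: simpler
-- what changed: Replaces the ordered fall-through of per-era substring branches by a data table mapping each year token to a cohort rank, a single min-rank accumulation pass over that table, and a rank-to-label lookup; the separate pre-2013 check disappears because that token contains the 2013 year token as a substring.
import Mathlib
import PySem

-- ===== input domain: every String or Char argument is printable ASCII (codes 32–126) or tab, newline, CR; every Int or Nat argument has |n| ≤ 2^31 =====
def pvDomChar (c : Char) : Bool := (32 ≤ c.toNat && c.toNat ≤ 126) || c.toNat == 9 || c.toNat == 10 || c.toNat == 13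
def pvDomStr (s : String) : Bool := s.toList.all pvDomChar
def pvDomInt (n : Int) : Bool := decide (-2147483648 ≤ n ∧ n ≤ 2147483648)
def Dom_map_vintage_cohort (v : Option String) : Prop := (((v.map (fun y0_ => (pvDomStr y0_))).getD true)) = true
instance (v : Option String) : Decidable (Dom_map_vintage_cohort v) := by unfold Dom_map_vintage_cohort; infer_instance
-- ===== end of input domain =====

-- B replaces A's ordered fall-through of substring branches by a token->rank table, one min-rank pass and a rank->label lookup (objective: simpler).


-- ===== PORT A =====
def map_vintage_cohort (v : Option String) : String :=
  match v with
  | none => "Unknown"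
  | some s =>
    if PySem.Str.isIn "pre2013" s || PySem.Str.isIn "2013" s || PySem.Str.isIn "2014" s || PySem.Str.isIn "2015" s then
      "Legacy (pre-2016)"
    else if ["2016", "2017", "2018", "2019"].any (fun y => PySem.Str.isIn y s) then
      "Growth Era (2016-2019)"
    else if ["2020", "2021", "2022"].any (fun y => PySem.Str.isIn y s) then
      "Post-COVID (2020-2022)"
    else if ["2023", "2024", "2025"].any (fun y => PySem.Str.isIn y s) then
      "Recent (2023+)"
    else "Acquisition"

-- ===== PORT B =====
def cohortRank : List (String × Nat) :=
  [("2013", 0), ("2014", 0), ("2015", 0),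
   ("2016", 1), ("2017", 1), ("2018", 1), ("2019", 1),
   ("2020", 2), ("2021", 2), ("2022", 2),
   ("2023", 3), ("2024", 3), ("2025", 3)]
def cohortLabels : List String :=
  ["Legacy (pre-2016)", "Growth Era (2016-2019)", "Post-COVID (2020-2022)", "Recent (2023+)"]

def map_vintage_cohort_alt (v : Option String) : String :=
  match v with
  | none => "Unknown"
  | some s =>
    let best := cohortRank.foldl
      (fun best p => if PySem.Str.isIn p.1 s && decide (p.2 < best) then p.2 else best) 4
    -- _COHORT_LABELS[best]: best < 4 here, so getD never takes its default; exact w.r.t. Python's indexing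
    if best == 4 then "Acquisition" else cohortLabels.getD best ""

-- ===== PRECONDITION & SPEC =====
def Spec_map_vintage_cohort (v : Option String) (out : String) : Prop := out = map_vintage_cohort_alt v
instance (v : Option String) (out : String) : Decidable (Spec_map_vintage_cohort v out) := by unfold Spec_map_vintage_cohort; infer_instance

-- ===== CLAIM (what is proved, stated in full; the proofs are below) =====
def Claim_equal_map_vintage_cohort : Prop := ∀ (v : Option String), Dom_map_vintage_cohort v → Spec_map_vintage_cohort v (map_vintage_cohort v)

-- ===== LEMMAS AND PROOFS =====

-- ===== VERDICT (by name: the statement is the Claim_ definition above) =====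
set_option maxHeartbeats 1000000 in
theorem map_vintage_cohort_spec : Claim_equal_map_vintage_cohort := by
  intro v _
  unfold Spec_map_vintage_cohort
  cases v with
  | none => rfl
  | some s =>
    have hpre : PySem.Chars.isIn ['p', 'r', 'e', '2', '0', '1', '3'] s.toList = true → PySem.Chars.isIn ['2', '0', '1', '3'] s.toList = true := by
      intro h
      rw [PySem.Chars.isIn_iff_infix] at h ⊢
      exact List.IsInfix.trans (by decide) h
    by_cases h2013 : PySem.Chars.isIn ['2', '0', '1', '3'] s.toList = true
    · simp [map_vintage_cohort, map_vintage_cohort_alt, cohortRank, cohortLabels, h2013]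
    simp only [Bool.not_eq_true] at h2013
    have hpf : PySem.Chars.isIn ['p', 'r', 'e', '2', '0', '1', '3'] s.toList = false := by
      rcases Bool.eq_false_or_eq_true (PySem.Chars.isIn ['p', 'r', 'e', '2', '0', '1', '3'] s.toList) with h | h
      · rw [hpre h] at h2013; exact absurd h2013 (by decide)
      · exact h
    by_cases h2014 : PySem.Chars.isIn ['2', '0', '1', '4'] s.toList = true
    · simp [map_vintage_cohort, map_vintage_cohort_alt, cohortRank, cohortLabels, hpf, h2013, h2014]
    simp only [Bool.not_eq_true] at h2014
    by_cases h2015 : PySem.Chars.isIn ['2', '0', '1', '5'] s.toList = true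
    · simp [map_vintage_cohort, map_vintage_cohort_alt, cohortRank, cohortLabels, hpf, h2013, h2014, h2015]
    simp only [Bool.not_eq_true] at h2015
    by_cases h2016 : PySem.Chars.isIn ['2', '0', '1', '6'] s.toList = true
    · simp [map_vintage_cohort, map_vintage_cohort_alt, cohortRank, cohortLabels, hpf, h2013, h2014, h2015, h2016]
    simp only [Bool.not_eq_true] at h2016
    by_cases h2017 : PySem.Chars.isIn ['2', '0', '1', '7'] s.toList = true
    · simp [map_vintage_cohort, map_vintage_cohort_alt, cohortRank, cohortLabels, hpf, h2013, h2014, h2015, h2016, h2017]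
    simp only [Bool.not_eq_true] at h2017
    by_cases h2018 : PySem.Chars.isIn ['2', '0', '1', '8'] s.toList = true
    · simp [map_vintage_cohort, map_vintage_cohort_alt, cohortRank, cohortLabels, hpf, h2013, h2014, h2015, h2016, h2017, h2018]
    simp only [Bool.not_eq_true] at h2018
    by_cases h2019 : PySem.Chars.isIn ['2', '0', '1', '9'] s.toList = true
    · simp [map_vintage_cohort, map_vintage_cohort_alt, cohortRank, cohortLabels, hpf, h2013, h2014, h2015, h2016, h2017, h2018, h2019]
    simp only [Bool.not_eq_true] at h2019
    by_cases h2020 : PySem.Chars.isIn ['2', '0', '2', '0'] s.toList = true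
    · simp [map_vintage_cohort, map_vintage_cohort_alt, cohortRank, cohortLabels, hpf, h2013, h2014, h2015, h2016, h2017, h2018, h2019, h2020]
    simp only [Bool.not_eq_true] at h2020
    by_cases h2021 : PySem.Chars.isIn ['2', '0', '2', '1'] s.toList = true
    · simp [map_vintage_cohort, map_vintage_cohort_alt, cohortRank, cohortLabels, hpf, h2013, h2014, h2015, h2016, h2017, h2018, h2019, h2020, h2021]
    simp only [Bool.not_eq_true] at h2021
    by_cases h2022 : PySem.Chars.isIn ['2', '0', '2', '2'] s.toList = true
    · simp [map_vintage_cohort, map_vintage_cohort_alt, cohortRank, cohortLabels, hpf, h2013, h2014, h2015, h2016, h2017, h2018, h2019, h2020, h2021, h2022]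
    simp only [Bool.not_eq_true] at h2022
    by_cases h2023 : PySem.Chars.isIn ['2', '0', '2', '3'] s.toList = true
    · simp [map_vintage_cohort, map_vintage_cohort_alt, cohortRank, cohortLabels, hpf, h2013, h2014, h2015, h2016, h2017, h2018, h2019, h2020, h2021, h2022, h2023]
    simp only [Bool.not_eq_true] at h2023
    by_cases h2024 : PySem.Chars.isIn ['2', '0', '2', '4'] s.toList = true
    · simp [map_vintage_cohort, map_vintage_cohort_alt, cohortRank, cohortLabels, hpf, h2013, h2014, h2015, h2016, h2017, h2018, h2019, h2020, h2021, h2022, h2023, h2024]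
    simp only [Bool.not_eq_true] at h2024
    by_cases h2025 : PySem.Chars.isIn ['2', '0', '2', '5'] s.toList = true
    · simp [map_vintage_cohort, map_vintage_cohort_alt, cohortRank, cohortLabels, hpf, h2013, h2014, h2015, h2016, h2017, h2018, h2019, h2020, h2021, h2022, h2023, h2024, h2025]
    simp only [Bool.not_eq_true] at h2025
    simp [map_vintage_cohort, map_vintage_cohort_alt, cohortRank, hpf, h2013, h2014, h2015, h2016, h2017, h2018, h2019, h2020, h2021, h2022, h2023, h2024, h2025]
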